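-- pv_equiv track=rewrite | github.com/FPreta/hvectorspaces | hvectorspaces/analysis/preprocess.py | create_per_decade_index
-- ===== SOURCE A (Python) =====
-- def create_per_decade_index(corpus_per_decade_lemmatized:dict[int,list[str]]) -> dict[int,tuple[int,int]]:
--     index = {}
--     start = 0
--
--     for k, v in corpus_per_decade_lemmatized.items():
--         end = start + len(v)
--         index[k] = (start, end)
--         start = end
--     return index
-- ===== SOURCE B (Python) =====
-- def create_per_decade_index(corpus_per_decade_lemmatized: dict[int, list[str]]) -> dict[int, tuple[int, int]]:
--     offsets = [0]
--     for v in corpus_per_decade_lemmatized.values():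
--         offsets.append(offsets[-1] + len(v))
--     return {k: (offsets[i], offsets[i + 1])
--             for i, k in enumerate(corpus_per_decade_lemmatized)}
-- ===== Notes on version B (the rewrite author's own statement) =====
-- stated objective: idiomatic
-- what changed: B first builds a prefix-offset table of cumulative lengths and then pairs each key with consecutive offsets in a dict comprehension, instead of threading a mutable start accumulator and inserting into the dict inside one loop.
import Mathlib
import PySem

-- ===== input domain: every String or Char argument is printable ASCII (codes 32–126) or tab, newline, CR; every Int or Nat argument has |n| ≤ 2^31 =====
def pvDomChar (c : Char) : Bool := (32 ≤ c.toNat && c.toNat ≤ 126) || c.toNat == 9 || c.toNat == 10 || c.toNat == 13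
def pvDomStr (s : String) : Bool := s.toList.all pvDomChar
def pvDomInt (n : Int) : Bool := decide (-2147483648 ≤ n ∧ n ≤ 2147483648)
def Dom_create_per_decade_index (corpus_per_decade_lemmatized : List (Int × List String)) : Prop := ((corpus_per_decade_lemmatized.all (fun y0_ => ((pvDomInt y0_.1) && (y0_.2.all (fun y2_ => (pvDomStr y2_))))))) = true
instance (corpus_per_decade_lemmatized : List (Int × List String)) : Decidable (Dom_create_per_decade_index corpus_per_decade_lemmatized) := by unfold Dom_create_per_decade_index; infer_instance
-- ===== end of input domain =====

-- B builds a prefix-offset table first and then pairs keys with consecutive offsets (more idiomatic decomposition); same values as A.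

-- ===== PORT A =====
def create_per_decade_index (corpus_per_decade_lemmatized : List (Int × List String)) : List (Int × Int × Int) :=
  (corpus_per_decade_lemmatized.foldl
    (fun (st : PySem.Dict Int (Int × Int) × Int) kv =>
      let e : Int := st.2 + (kv.2.length : Int)
      (st.1.insert kv.1 (st.2, e), e))
    (PySem.Dict.empty, 0)).1.items

-- ===== PORT B =====
def create_per_decade_index_alt (corpus_per_decade_lemmatized : List (Int × List String)) : List (Int × Int × Int) :=
  let offsets : List Int :=
    corpus_per_decade_lemmatized.foldl
      (fun (offs : List Int) kv => offs ++ [PySem.List.pyGetD offs (-1) 0 + (kv.2.length : Int)]) [0]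
  -- dict comprehension over distinct keys (Pre_ guarantees the keys are distinct): the items list in order
  (PySem.List.enumerate corpus_per_decade_lemmatized 0).map
    (fun p => (p.2.1, PySem.List.pyGetD offsets p.1 0, PySem.List.pyGetD offsets (p.1 + 1) 0))

-- ===== PRECONDITION & SPEC =====
-- Pre_ excludes association lists with duplicate keys: the Python argument is a dict, whose keys are
-- always distinct, so such lists do not represent any input A is ever called on.
def Pre_create_per_decade_index (corpus_per_decade_lemmatized : List (Int × List String)) : Prop :=
  (corpus_per_decade_lemmatized.map Prod.fst).Nodup
instance (corpus_per_decade_lemmatized : List (Int × List String)) : Decidable (Pre_create_per_decade_index corpus_per_decade_lemmatized) := by unfold Pre_create_per_decade_index; infer_instance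

def pvWitness_create_per_decade_index : (List (Int × List String)) := [(1790, ["a", "b"]), (1800, ["c"]), (1810, [])]

def Spec_create_per_decade_index (corpus_per_decade_lemmatized : List (Int × List String)) (out : List (Int × Int × Int)) : Prop := out = create_per_decade_index_alt corpus_per_decade_lemmatized
instance (corpus_per_decade_lemmatized : List (Int × List String)) (out : List (Int × Int × Int)) : Decidable (Spec_create_per_decade_index corpus_per_decade_lemmatized out) := by unfold Spec_create_per_decade_index; infer_instance

-- ===== CLAIM (what is proved, stated in full; the proofs are below) =====
def Claim_equal_create_per_decade_index : Prop := ∀ (corpus_per_decade_lemmatized : List (Int × List String)), Dom_create_per_decade_index corpus_per_decade_lemmatized → Pre_create_per_decade_index corpus_per_decade_lemmatized → Spec_create_per_decade_index corpus_per_decade_lemmatized (create_per_decade_index corpus_per_decade_lemmatized)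

-- ===== LEMMAS AND PROOFS =====

-- Reference result: (key, start, end) triples with running offset s.
def pvBuild (s : Int) : List (Int × List String) → List (Int × Int × Int)
  | [] => []
  | kv :: t => (kv.1, s, s + (kv.2.length : Int)) :: pvBuild (s + (kv.2.length : Int)) t

-- Cumulative offsets after s (the tail of B's offsets table).
def pvSums (s : Int) : List (Int × List String) → List Int
  | [] => []
  | kv :: t => (s + (kv.2.length : Int)) :: pvSums (s + (kv.2.length : Int)) t

theorem pvA_loop (c : List (Int × List String)) (d : PySem.Dict Int (Int × Int)) (s : Int)
    (hnd : (c.map Prod.fst).Nodup)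
    (hfresh : ∀ k ∈ c.map Prod.fst, d.contains k = false) :
    (c.foldl
      (fun (st : PySem.Dict Int (Int × Int) × Int) kv =>
        let e : Int := st.2 + (kv.2.length : Int)
        (st.1.insert kv.1 (st.2, e), e)) (d, s)).1.items = d.items ++ pvBuild s c := by
  induction c generalizing d s with
  | nil => simp [pvBuild]
  | cons kv t ih =>
    simp only [List.map_cons, List.nodup_cons] at hnd
    have hk : d.contains kv.1 = false := hfresh kv.1 (by simp)
    have step := ih (d.insert kv.1 (s, s + (kv.2.length : Int))) (s + (kv.2.length : Int)) hnd.2 ?_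
    · simp only [List.foldl_cons, pvBuild]
      rw [step, PySem.Dict.items_insert_of_not_contains _ _ hk]
      simp
    · intro k hkmem
      rw [PySem.Dict.contains_insert]
      have : k ≠ kv.1 := by
        intro h; exact hnd.1 (h ▸ hkmem)
      simp [this, hfresh k (by simp [hkmem])]

theorem pvB_offsets (c : List (Int × List String)) (a : List Int) (s : Int)
    (ha : PySem.List.pyGetD a (-1) 0 = s) :
    c.foldl (fun (offs : List Int) kv => offs ++ [PySem.List.pyGetD offs (-1) 0 + (kv.2.length : Int)]) a
      = a ++ pvSums s c := by
  induction c generalizing a s with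
  | nil => simp [pvSums]
  | cons kv t ih =>
    simp only [List.foldl_cons, pvSums]
    rw [ha, ih (a ++ [s + (kv.2.length : Int)]) (s + (kv.2.length : Int))
          (PySem.List.pyGetD_neg_one_append_singleton _ _ _)]
    simp

theorem pvB_pairing (c : List (Int × List String)) (pre : List Int) (s : Int) :
    (PySem.List.enumerate c (pre.length : Int)).map
      (fun p => (p.2.1, PySem.List.pyGetD (pre ++ s :: pvSums s c) p.1 0,
                 PySem.List.pyGetD (pre ++ s :: pvSums s c) (p.1 + 1) 0))
      = pvBuild s c := by
  induction c generalizing pre s with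
  | nil => simp [PySem.List.enumerate_nil, pvBuild]
  | cons kv t ih =>
    have hoff : pre ++ s :: pvSums s (kv :: t)
        = (pre ++ [s]) ++ (s + (kv.2.length : Int)) :: pvSums (s + (kv.2.length : Int)) t := by
      simp [pvSums]
    have h1 : PySem.List.pyGetD (pre ++ s :: pvSums s (kv :: t)) (pre.length : Int) 0 = s := by
      rw [PySem.List.pyGetD_natCast]
      simp [List.getD]
    have h2 : PySem.List.pyGetD (pre ++ s :: pvSums s (kv :: t)) ((pre.length : Int) + 1) 0
        = s + (kv.2.length : Int) := by
      have : ((pre.length : Int) + 1) = (((pre ++ [s]).length : Nat) : Int) := by simp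
      rw [this, PySem.List.pyGetD_natCast, hoff]
      simp [List.getD]
    rw [PySem.List.enumerate_cons]
    simp only [List.map_cons, pvBuild, h1, h2]
    congr 1
    have hlen : (pre.length : Int) + 1 = (((pre ++ [s]).length : Nat) : Int) := by simp
    rw [hlen, hoff]
    exact ih (pre ++ [s]) (s + (kv.2.length : Int))

theorem pvA_eq_build (c : List (Int × List String)) (h : (c.map Prod.fst).Nodup) :
    create_per_decade_index c = pvBuild 0 c := by
  unfold create_per_decade_index
  rw [pvA_loop c PySem.Dict.empty 0 h (by intro k _; exact PySem.Dict.contains_empty k)]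
  simp [PySem.Dict.empty]

theorem pvB_eq_build (c : List (Int × List String)) :
    create_per_decade_index_alt c = pvBuild 0 c := by
  unfold create_per_decade_index_alt
  rw [pvB_offsets c [0] 0 (by simp [PySem.List.pyGetD, PySem.List.pyGet?, PySem.List.pyIdx?])]
  have := pvB_pairing c [] 0
  simpa using this

-- ===== VERDICT (by name: the statement is the Claim_ definition above) =====
theorem create_per_decade_index_spec : Claim_equal_create_per_decade_index := by
  intro c _ hpre
  unfold Spec_create_per_decade_index
  rw [pvA_eq_build c hpre, pvB_eq_build c]
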